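-- pv_equiv track=rewrite | github.com/hahaliu/LeetCode-Python3 | 890.find-and-replace-pattern.py | findAndReplacePattern
-- ===== SOURCE A (Python) =====
-- def findAndReplacePattern(words, pattern):
--     """
--     :type words: List[str]
--     :type pattern: str
--     :rtype: List[str]
--     """
--     def match(word):
--         lookup = {}
--         for x, y in zip(pattern, word):
--             if lookup.setdefault(x, y) != y:
--                 return False
--         return len(set(lookup.values())) == len(lookup.values())
--
--     return list(filter(match, words))
-- ===== SOURCE B (Python) =====
-- def findAndReplacePattern(words, pattern):
--     # Brute-force pairwise check: a word matches iff equality of positions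
--     # agrees between pattern and word on the zipped (common-prefix) pairs.
--     def ok(word):
--         pairs = list(zip(pattern, word))
--         return all((x1 == x2) == (y1 == y2)
--                    for (x1, y1) in pairs for (x2, y2) in pairs)
--     return [w for w in words if ok(w)]
-- ===== Notes on version B (the rewrite author's own statement) =====
-- stated objective: alternative
-- what changed: Replaces A's forward-mapping dict plus set-size injectivity check with a dict-free brute-force pairwise test: a word matches iff for every two zipped (pattern,word) pairs the pattern chars are equal exactly when the word chars are.
import Mathlib
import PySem

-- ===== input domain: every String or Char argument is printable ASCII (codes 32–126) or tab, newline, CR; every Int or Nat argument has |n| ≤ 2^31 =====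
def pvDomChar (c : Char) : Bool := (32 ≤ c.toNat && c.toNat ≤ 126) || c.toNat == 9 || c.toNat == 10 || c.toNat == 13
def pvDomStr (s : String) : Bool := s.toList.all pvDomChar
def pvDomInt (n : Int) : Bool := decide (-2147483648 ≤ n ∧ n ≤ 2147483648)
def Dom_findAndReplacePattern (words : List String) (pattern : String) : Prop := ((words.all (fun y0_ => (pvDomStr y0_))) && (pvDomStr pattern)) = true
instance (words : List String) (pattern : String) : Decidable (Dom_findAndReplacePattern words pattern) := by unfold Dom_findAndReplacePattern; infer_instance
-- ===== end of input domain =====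

-- B replaces A's forward-mapping dict + set-size injectivity check by a dict-free
-- brute-force pairwise test over the zipped (pattern, word) pairs (objective: alternative).

-- ===== PORT A =====
-- the loop `for x, y in zip(pattern, word): if lookup.setdefault(x, y) != y: return False`
def pvMatchGo (d : PySem.Dict Char Char) : List (Char × Char) → Option (PySem.Dict Char Char)
  | [] => some d
  | (x, y) :: rest =>
    if (d.get? x).getD y ≠ y then none
    else pvMatchGo (d.setdefault x y) rest

-- A's inner `match(word)`
def pvMatchA (pattern : String) (word : String) : Bool :=
  match pvMatchGo PySem.Dict.empty (pattern.toList.zip word.toList) with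
  | none => false
  | some d => PySem.Set.len (PySem.Set.ofList d.values) == d.values.length

def findAndReplacePattern (words : List String) (pattern : String) : List String :=
  words.filter (fun w => pvMatchA pattern w)

-- ===== PORT B =====
-- B's `ok(word)`: pairwise check over the zipped pairs
def pvOkB (pattern : String) (word : String) : Bool :=
  let pairs := pattern.toList.zip word.toList
  pairs.all (fun a => pairs.all (fun b => (a.1 == b.1) == (a.2 == b.2)))

def findAndReplacePattern_alt (words : List String) (pattern : String) : List String :=
  words.filter (fun w => pvOkB pattern w)

-- ===== PRECONDITION & SPEC =====
def Spec_findAndReplacePattern (words : List String) (pattern : String) (out : List String) : Prop := out = findAndReplacePattern_alt words pattern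
instance (words : List String) (pattern : String) (out : List String) : Decidable (Spec_findAndReplacePattern words pattern out) := by unfold Spec_findAndReplacePattern; infer_instance

-- ===== CLAIM (what is proved, stated in full; the proofs are below) =====
def Claim_equal_findAndReplacePattern : Prop := ∀ (words : List String) (pattern : String), Dom_findAndReplacePattern words pattern → Spec_findAndReplacePattern words pattern (findAndReplacePattern words pattern)

-- ===== LEMMAS AND PROOFS =====

-- first value associated to a key in a pair list (what A's dict ends up storing)
def pvFirst : List (Char × Char) → Char → Option Char
  | [], _ => none
  | (a, b) :: r, x => if a = x then some b else pvFirst r x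

-- the lookup function A's loop realizes: the dict so far, else the first occurrence ahead
def pvM (d : PySem.Dict Char Char) (l : List (Char × Char)) (x : Char) : Option Char :=
  match d.get? x with
  | some v => some v
  | none => pvFirst l x

theorem pvM_step (d : PySem.Dict Char Char) (x y : Char) (rest : List (Char × Char)) (k : Char) :
    pvM d ((x, y) :: rest) k = pvM (d.setdefault x y) rest k := by
  cases h : d.get? x with
  | some v =>
    have hc : d.contains x = true := by
      rw [PySem.Dict.contains_eq_isSome_get?, h]; rfl
    rw [PySem.Dict.setdefault_of_contains _ _ hc]
    cases h2 : d.get? k with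
    | some w => simp [pvM, h2]
    | none =>
      have hxk : ¬ (x = k) := fun he => by rw [he, h2] at h; cases h
      simp [pvM, pvFirst, h2, hxk]
  | none =>
    have hc : d.contains x = false := by
      rw [PySem.Dict.contains_eq_isSome_get?, h]; rfl
    rw [PySem.Dict.setdefault_of_not_contains _ _ hc]
    by_cases hk : k = x
    · subst hk; simp [pvM, pvFirst, h, PySem.Dict.get?_insert_self]
    · rw [pvM, pvM, PySem.Dict.get?_insert_of_ne _ _ hk]
      cases h2 : d.get? k with
      | some w => rfl
      | none => simp [pvFirst, Ne.symm hk]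

theorem pvMatchGo_some_iff (l : List (Char × Char)) : ∀ d : PySem.Dict Char Char,
    (pvMatchGo d l).isSome = true ↔ ∀ p ∈ l, pvM d l p.1 = some p.2 := by
  induction l with
  | nil => intro d; simp [pvMatchGo]
  | cons hd rest ih =>
    intro d
    obtain ⟨x, y⟩ := hd
    by_cases hv : (d.get? x).getD y = y
    · have hhead : pvM d ((x, y) :: rest) x = some y := by
        cases h : d.get? x with
        | some v => rw [h] at hv; simp at hv; simp [pvM, h, hv]
        | none => simp [pvM, pvFirst, h]
      simp only [pvMatchGo, hv, ne_eq, not_true_eq_false, if_false]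
      rw [ih (d.setdefault x y), List.forall_mem_cons]
      constructor
      · intro hrest
        refine ⟨hhead, fun p hp => ?_⟩
        rw [pvM_step]; exact hrest p hp
      · rintro ⟨_, hrest⟩ p hp
        rw [← pvM_step]; exact hrest p hp
    · have : pvMatchGo d ((x, y) :: rest) = none := by
        simp only [pvMatchGo]; rw [if_pos (by simpa using hv)]
      rw [this]
      simp only [Option.isSome_none, Bool.false_eq_true, false_iff]
      intro hall
      have hx := hall (x, y) (List.mem_cons_self)
      cases h : d.get? x with
      | some v =>
        rw [pvM, h] at hx
        simp at hx
        exact hv (by rw [h, hx]; rfl)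
      | none => exact hv (by rw [h]; rfl)

theorem pvMatchGo_get (l : List (Char × Char)) : ∀ d d' : PySem.Dict Char Char,
    pvMatchGo d l = some d' → ∀ k, d'.get? k = pvM d l k := by
  induction l with
  | nil =>
    intro d d' h k
    simp only [pvMatchGo, Option.some.injEq] at h
    subst h
    cases h2 : d.get? k <;> simp [pvM, h2, pvFirst]
  | cons hd rest ih =>
    intro d d' h k
    obtain ⟨x, y⟩ := hd
    simp only [pvMatchGo] at h
    by_cases hv : (d.get? x).getD y = y
    · rw [if_neg (by simp [hv])] at h
      rw [pvM_step]
      exact ih _ _ h k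
    · rw [if_pos (by simpa using hv)] at h; cases h

theorem pvMatchGo_nodup (l : List (Char × Char)) : ∀ d d' : PySem.Dict Char Char,
    pvMatchGo d l = some d' → d.keys.Nodup → d'.keys.Nodup := by
  induction l with
  | nil => intro d d' h hn; simp only [pvMatchGo] at h; cases h; exact hn
  | cons hd rest ih =>
    intro d d' h hn
    obtain ⟨x, y⟩ := hd
    simp only [pvMatchGo] at h
    by_cases hv : (d.get? x).getD y = y
    · rw [if_neg (by simp [hv])] at h
      refine ih _ _ h ?_
      cases hc : d.contains x with
      | true => rw [PySem.Dict.setdefault_of_contains _ _ hc]; exact hn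
      | false =>
        rw [PySem.Dict.setdefault_of_not_contains _ _ hc]
        exact PySem.Dict.nodup_keys_insert _ _ _ hn
    · rw [if_pos (by simpa using hv)] at h; cases h

theorem pvFirst_mem {l : List (Char × Char)} {x y : Char} (h : pvFirst l x = some y) : (x, y) ∈ l := by
  induction l with
  | nil => cases h
  | cons hd rest ih =>
    obtain ⟨a, b⟩ := hd
    by_cases ha : a = x
    · rw [pvFirst, if_pos ha] at h
      cases h
      subst ha
      exact List.mem_cons_self
    · rw [pvFirst, if_neg ha] at h
      exact List.mem_cons_of_mem _ (ih h)

theorem pvFirst_of_mem {l : List (Char × Char)} {p : Char × Char} (h : p ∈ l) :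
    ∃ v, pvFirst l p.1 = some v := by
  induction l with
  | nil => cases h
  | cons hd rest ih =>
    obtain ⟨a, b⟩ := hd
    by_cases ha : a = p.1
    · exact ⟨b, by rw [pvFirst, if_pos ha]⟩
    · rcases List.mem_cons.mp h with he | hm
      · exact absurd (by rw [he]) ha
      · obtain ⟨v, hv⟩ := ih hm
        exact ⟨v, by rw [pvFirst, if_neg ha]; exact hv⟩

-- len(set(xs)) == len(xs) is exactly Nodup
theorem pvLenSet_iff (xs : List Char) : (PySem.Set.len (PySem.Set.ofList xs) == xs.length) = true ↔ xs.Nodup := by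
  have hperm : List.Perm (PySem.Set.ofList xs) xs.dedup :=
    (List.perm_ext_iff_of_nodup (PySem.Set.nodup_ofList xs) xs.nodup_dedup).mpr
      (fun a => by simp [PySem.Set.mem_ofList, List.mem_dedup])
  constructor
  · intro h
    have hlen : (PySem.Set.ofList xs).length = xs.length := by
      simpa [PySem.Set.len] using h
    have : xs.dedup.length = xs.length := by rw [← hperm.length_eq]; exact hlen
    have hde : xs.dedup = xs := xs.dedup_sublist.eq_of_length this
    rw [← hde]; exact xs.nodup_dedup
  · intro hn
    rw [PySem.Set.ofList_eq_self_of_nodup xs hn]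
    simp [PySem.Set.len]

-- the per-word equivalence: A's match = B's ok
-- boolean shape of the pairwise condition
theorem pvBeq_iff (x y u v : Char) : (((x == y) == (u == v)) = true) ↔ (x = y ↔ u = v) := by
  by_cases h1 : x = y <;> by_cases h2 : u = v <;> simp [h1, h2]

-- the per-word equivalence: A's match = B's ok
theorem pvMatch_eq (pattern word : String) : pvMatchA pattern word = pvOkB pattern word := by
  rw [Bool.eq_iff_iff]
  unfold pvMatchA pvOkB
  have hB : ((pattern.toList.zip word.toList).all
      (fun a => (pattern.toList.zip word.toList).all
        (fun b => (a.1 == b.1) == (a.2 == b.2))) = true)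
      ↔ ∀ a ∈ pattern.toList.zip word.toList, ∀ b ∈ pattern.toList.zip word.toList,
          (a.1 = b.1 ↔ a.2 = b.2) := by
    simp only [List.all_eq_true, pvBeq_iff]
  rw [hB]
  set l := pattern.toList.zip word.toList with hl
  have hMempty : ∀ k, pvM PySem.Dict.empty l k = pvFirst l k := by
    intro k; simp [pvM, PySem.Dict.get?_empty]
  cases hgo : pvMatchGo PySem.Dict.empty l with
  | none =>
    simp only [Bool.false_eq_true, false_iff]
    intro hP
    have hsome : (pvMatchGo PySem.Dict.empty l).isSome = true := by
      rw [pvMatchGo_some_iff]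
      intro p hp
      obtain ⟨v, hv⟩ := pvFirst_of_mem hp
      have hmem : (p.1, v) ∈ l := pvFirst_mem hv
      have := (hP p hp (p.1, v) hmem).mp rfl
      rw [hMempty, hv, this]
    rw [hgo] at hsome; cases hsome
  | some d' =>
    have hget : ∀ k, d'.get? k = pvFirst l k := by
      intro k; rw [pvMatchGo_get l _ _ hgo k, hMempty]
    have hnd : d'.keys.Nodup :=
      pvMatchGo_nodup l _ _ hgo (by simp [PySem.Dict.keys_empty])
    have hfunc : ∀ p ∈ l, pvFirst l p.1 = some p.2 := by
      have := (pvMatchGo_some_iff l PySem.Dict.empty).mp (by rw [hgo]; rfl)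
      intro p hp; rw [← hMempty]; exact this p hp
    have hndk : (d'.items.map (fun p => p.1)).Nodup := by
      simpa [PySem.Dict.keys] using hnd
    rw [pvLenSet_iff]
    have hvals : d'.values = d'.items.map (fun p => p.2) := by
      simp [PySem.Dict.values]
    rw [hvals]
    constructor
    · intro hnv a ha b hb
      constructor
      · intro h1
        have hfa := hfunc a ha
        have hfb := hfunc b hb
        rw [h1, hfb] at hfa
        exact (Option.some_inj.mp hfa).symm
      · intro h2
        have hma : (a.1, a.2) ∈ d'.items :=
          PySem.Dict.mem_items_of_get?_eq_some _ (by rw [hget]; exact hfunc a ha)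
        have hmb : (b.1, b.2) ∈ d'.items :=
          PySem.Dict.mem_items_of_get?_eq_some _ (by rw [hget]; exact hfunc b hb)
        have := List.inj_on_of_nodup_map hnv hma hmb (by simpa using h2)
        simpa using congrArg (fun p => p.1) this
    · intro hP
      have hitems : d'.items.Nodup := List.Nodup.of_map _ hndk
      refine List.Nodup.map_on ?_ hitems
      intro p hp q hq hpq
      have hpl : p ∈ l := by
        have := PySem.Dict.get?_of_mem_items _ (k := p.1) (v := p.2) (by simpa using hp) hnd
        rw [hget] at this
        have := pvFirst_mem this
        simpa using this
      have hql : q ∈ l := by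
        have := PySem.Dict.get?_of_mem_items _ (k := q.1) (v := q.2) (by simpa using hq) hnd
        rw [hget] at this
        have := pvFirst_mem this
        simpa using this
      have h1 : p.1 = q.1 := (hP p hpl q hql).mpr hpq
      exact List.inj_on_of_nodup_map hndk hp hq h1

-- ===== VERDICT (by name: the statement is the Claim_ definition above) =====
theorem findAndReplacePattern_spec : Claim_equal_findAndReplacePattern := by
  intro words pattern _
  unfold Spec_findAndReplacePattern findAndReplacePattern findAndReplacePattern_alt
  exact List.filter_congr (fun w _ => pvMatch_eq pattern w)
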